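-- pv_equiv track=rewrite | github.com/peixeman/Media-Database | poster_scraper.py | find_movie_match
-- ===== SOURCE A (Python) =====
-- def find_movie_match(articles, title, year):
--     for article in articles:
--         if f"{title.lower()} ({str(year)} film)" in article.lower():
--             return article
--     for article in articles:
--         if f"{title.lower()} (film)" == article.lower():
--             return article
--     for article in articles:
--         if title.lower() in article.lower() or "film" in article.lower() or str(year) in article.lower():
--             return article
--     return articles[0]
-- ===== SOURCE B (Python) =====
-- def find_movie_match(articles, title, year):
--     t = title.lower()
--     key1 = f"{t} ({str(year)} film)"
--     key2 = f"{t} (film)"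
--     ystr = str(year)
--     tier2 = None
--     tier3 = None
--     for article in articles:
--         low = article.lower()
--         if key1 in low:
--             return article
--         if tier2 is None and low == key2:
--             tier2 = article
--         if tier3 is None and (t in low or "film" in low or ystr in low):
--             tier3 = article
--     if tier2 is not None:
--         return tier2
--     if tier3 is not None:
--         return tier3
--     return articles[0]
-- ===== Notes on version B (the rewrite author's own statement) =====
-- stated objective: simpler
-- what changed: Replaces A's three sequential scans over the list with a single pass that returns tier-1 matches immediately and records only the first tier-2 and tier-3 candidates, returning the best recorded candidate (or articles[0]) after the loop; precomputed lowercase keys and one article.lower() per element avoid A's repeated recomputation.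
import Mathlib
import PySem

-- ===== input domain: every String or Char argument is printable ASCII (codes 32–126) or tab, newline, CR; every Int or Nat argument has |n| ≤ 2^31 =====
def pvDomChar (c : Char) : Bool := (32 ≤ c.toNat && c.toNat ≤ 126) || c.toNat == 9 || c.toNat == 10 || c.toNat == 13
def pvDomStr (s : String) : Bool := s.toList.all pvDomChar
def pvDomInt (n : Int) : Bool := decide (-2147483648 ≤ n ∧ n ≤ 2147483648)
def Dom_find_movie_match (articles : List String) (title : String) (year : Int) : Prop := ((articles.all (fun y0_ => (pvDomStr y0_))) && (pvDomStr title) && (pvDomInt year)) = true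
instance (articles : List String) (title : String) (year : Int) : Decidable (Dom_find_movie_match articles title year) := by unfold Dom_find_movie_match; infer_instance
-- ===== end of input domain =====

-- B is a single pass that returns tier-1 hits at once and records the first tier-2/tier-3
-- candidates, instead of A's three sequential scans; same result, one traversal.
-- Equivalence is about the return value; neither program mutates its arguments.

-- ===== PORT A =====
-- shared match predicates (each is one Python membership/equality test, used verbatim by both programs)
-- f"{title.lower()} ({str(year)} film)"
def pvKey1 (title : String) (year : Int) : List Char :=
  PySem.Chars.lower title.toList ++ (" (".toList ++ (PySem.Int.toChars year ++ " film)".toList))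
-- f"{title.lower()} (film)"
def pvKey2 (title : String) : List Char :=
  PySem.Chars.lower title.toList ++ " (film)".toList
def pvP1 (title : String) (year : Int) (a : String) : Bool :=
  PySem.Chars.isIn (pvKey1 title year) (PySem.Chars.lower a.toList)
def pvP2 (title : String) (a : String) : Bool :=
  pvKey2 title == PySem.Chars.lower a.toList
def pvP3 (title : String) (year : Int) (a : String) : Bool :=
  PySem.Chars.isIn (PySem.Chars.lower title.toList) (PySem.Chars.lower a.toList)
  || PySem.Chars.isIn "film".toList (PySem.Chars.lower a.toList)
  || PySem.Chars.isIn (PySem.Int.toChars year) (PySem.Chars.lower a.toList)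

-- one 'for article in articles: if p(article): return article' loop of A
def pvScanA (p : String → Bool) : List String → Option String
  | [] => none
  | a :: t => if p a then some a else pvScanA p t

def find_movie_match (articles : List String) (title : String) (year : Int) : String :=
  match pvScanA (pvP1 title year) articles with
  | some a => a
  | none =>
    match pvScanA (pvP2 title) articles with
    | some a => a
    | none =>
      match pvScanA (pvP3 title year) articles with
      | some a => a
      | none => (PySem.List.pyGet? articles 0).getD ""   -- articles[0]; Pre_ excludes the IndexError ([])

-- ===== PORT B =====
-- B's single loop: return on a tier-1 hit, remember the first tier-2 and tier-3 candidates
def pvGoB (p1 p2 p3 : String → Bool) (fb : String) :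
    List String → Option String → Option String → String
  | [], c2, c3 =>
    match c2 with
    | some a => a
    | none => match c3 with
      | some a => a
      | none => fb
  | a :: t, c2, c3 =>
    if p1 a then a
    else pvGoB p1 p2 p3 fb t
      (if c2.isNone && p2 a then some a else c2)
      (if c3.isNone && p3 a then some a else c3)

def find_movie_match_alt (articles : List String) (title : String) (year : Int) : String :=
  pvGoB (pvP1 title year) (pvP2 title) (pvP3 title year)
    ((PySem.List.pyGet? articles 0).getD "") articles none none

-- ===== PRECONDITION & SPEC =====
-- Pre_ excludes the empty list, on which Python A (and B) raise IndexError at articles[0].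
def Pre_find_movie_match (articles : List String) (title : String) (year : Int) : Prop :=
  articles ≠ []
instance (articles : List String) (title : String) (year : Int) : Decidable (Pre_find_movie_match articles title year) := by unfold Pre_find_movie_match; infer_instance

def pvWitness_find_movie_match : List String × String × Int := (["Dog (2000 film)"], "dog", 2000)

def Spec_find_movie_match (articles : List String) (title : String) (year : Int) (out : String) : Prop := out = find_movie_match_alt articles title year
instance (articles : List String) (title : String) (year : Int) (out : String) : Decidable (Spec_find_movie_match articles title year out) := by unfold Spec_find_movie_match; infer_instance

-- ===== CLAIM (what is proved, stated in full; the proofs are below) =====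
def Claim_equal_find_movie_match : Prop := ∀ (articles : List String) (title : String) (year : Int), Dom_find_movie_match articles title year → Pre_find_movie_match articles title year → Spec_find_movie_match articles title year (find_movie_match articles title year)

-- ===== LEMMAS AND PROOFS =====

-- B's single pass equals A's layered scans, with the accumulators joined in front of the remaining scans.
theorem pvGoB_eq (p1 p2 p3 : String → Bool) (fb : String) :
    ∀ (xs : List String) (c2 c3 : Option String),
      pvGoB p1 p2 p3 fb xs c2 c3 =
        match pvScanA p1 xs with
        | some a => a
        | none =>
          match c2.or (pvScanA p2 xs) with
          | some a => a
          | none =>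
            match c3.or (pvScanA p3 xs) with
            | some a => a
            | none => fb := by
  intro xs
  induction xs with
  | nil => intro c2 c3; cases c2 <;> cases c3 <;> simp [pvGoB, pvScanA]
  | cons a t ih =>
    intro c2 c3
    by_cases h1 : p1 a
    · simp [pvGoB, pvScanA, h1]
    · simp only [pvGoB, pvScanA, h1, if_false, ih]
      cases c2 <;> cases c3 <;> by_cases h2 : p2 a <;> by_cases h3 : p3 a <;>
        simp [h2, h3, Option.or]

theorem find_movie_match_spec : Claim_equal_find_movie_match := by
  intro articles title year _ _
  unfold Spec_find_movie_match find_movie_match find_movie_match_alt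
  rw [pvGoB_eq]
  simp [Option.or]
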